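-- pv_equiv track=rewrite | github.com/yotti5160/Codility | Challenges/Buckets.py | solution
-- ===== SOURCE A (Python) =====
-- import collections
--
-- def solution(N, Q, B, C):
--     l=len(B)
--     book=collections.defaultdict(int)
--     for i in range(l):
--         book[(B[i], C[i])]+=1
--         if book[(B[i], C[i])]==Q:
--             return i
--     return -1
-- ===== SOURCE B (Python) =====
-- import collections
--
-- def solution(N, Q, B, C):
--     # Pass 1: total count of every (B[i], C[i]) pair.
--     total = collections.defaultdict(int)
--     for i in range(len(B)):
--         total[(B[i], C[i])] += 1
--     # Pass 2: scan right-to-left; the count of the pair in the prefix ending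
--     # at i is total minus the occurrences strictly after i.  The last index
--     # written to `best` (the leftmost hit) is the answer.
--     best = -1
--     after = collections.defaultdict(int)
--     for i in reversed(range(len(B))):
--         key = (B[i], C[i])
--         if total[key] - after[key] == Q:
--             best = i
--         after[key] += 1
--     return best
-- ===== Notes on version B (the rewrite author's own statement) =====
-- stated objective: alternative
-- what changed: Replaces the single early-exit counting loop by two full passes: a Counter of pair totals, then a right-to-left scan whose running suffix counts give each prefix count as total minus after, keeping the last (= leftmost) hit.
-- outside the precondition, e.g. on solution(0, 1, [1, 1], [2]): A returns 0, B raises IndexError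
import Mathlib
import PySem

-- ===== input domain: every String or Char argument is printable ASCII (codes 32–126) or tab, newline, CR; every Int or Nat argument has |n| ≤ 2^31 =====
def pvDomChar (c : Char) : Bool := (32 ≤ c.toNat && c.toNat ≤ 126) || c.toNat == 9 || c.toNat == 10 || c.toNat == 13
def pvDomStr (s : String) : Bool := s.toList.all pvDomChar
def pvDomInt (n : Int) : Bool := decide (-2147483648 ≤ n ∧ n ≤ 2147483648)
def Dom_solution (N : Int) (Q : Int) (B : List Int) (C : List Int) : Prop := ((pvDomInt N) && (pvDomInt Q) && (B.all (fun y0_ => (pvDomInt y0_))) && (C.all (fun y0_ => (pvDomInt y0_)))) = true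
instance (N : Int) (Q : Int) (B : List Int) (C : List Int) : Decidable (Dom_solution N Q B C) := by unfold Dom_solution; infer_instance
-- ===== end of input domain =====

-- B replaces A's single early-exit counting loop by two full passes (pair totals, then a
-- right-to-left scan computing each prefix count as total minus suffix count); same cost, no speed claim.


-- ===== PORT A =====
-- (B[i], C[i]); the `.getD 0` default never fires under Pre_solution (i < B.length ≤ C.length),
-- and outside Pre_solution (where Python's C[i] raises IndexError) nothing is claimed.
def pairAt (B : List Int) (C : List Int) (i : Nat) : Int × Int :=
  ((PySem.List.pyGet? B (i : Int)).getD 0, (PySem.List.pyGet? C (i : Int)).getD 0)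

-- `for i in range(l): book[(B[i],C[i])] += 1; if book[(B[i],C[i])] == Q: return i` / `return -1`
def solutionLoop (Q : Int) (B : List Int) (C : List Int)
    (book : PySem.Dict (Int × Int) Int) : List Nat → Int
  | [] => -1
  | i :: rest =>
    let k := pairAt B C i
    let book' := book.insert k (book.getD k 0 + 1)
    if book'.getD k 0 = Q then (i : Int) else solutionLoop Q B C book' rest

def solution (N : Int) (Q : Int) (B : List Int) (C : List Int) : Int :=
  solutionLoop Q B C PySem.Dict.empty (List.range B.length)

-- ===== PORT B =====
-- pass 1: total = defaultdict(int); total[(B[i],C[i])] += 1 for each i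
def totalCnt (B : List Int) (C : List Int) : PySem.Dict (Int × Int) Int :=
  (List.range B.length).foldl
    (fun d i => d.insert (pairAt B C i) (d.getD (pairAt B C i) 0 + 1)) PySem.Dict.empty

-- one step of pass 2 (state = (best, after)): if total[k]-after[k]==Q: best=i; after[k] += 1
def stepB (Q : Int) (B : List Int) (C : List Int) (total : PySem.Dict (Int × Int) Int)
    (s : Int × PySem.Dict (Int × Int) Int) (i : Nat) : Int × PySem.Dict (Int × Int) Int :=
  let k := pairAt B C i
  (if total.getD k 0 - s.2.getD k 0 = Q then (i : Int) else s.1,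
   s.2.insert k (s.2.getD k 0 + 1))

def solution_alt (N : Int) (Q : Int) (B : List Int) (C : List Int) : Int :=
  ((List.range B.length).reverse.foldl (stepB Q B C (totalCnt B C))
    ((-1 : Int), PySem.Dict.empty)).1

-- ===== PRECONDITION & SPEC =====
-- Pre_ excludes B longer than C, where Python's A raises IndexError at C[i] unless the early
-- return happens to fire first; B always raises there (it scans all indices), so those inputs
-- on which A returns only by accident of its early exit are excluded too.
def Pre_solution (N : Int) (Q : Int) (B : List Int) (C : List Int) : Prop :=
  B.length ≤ C.length
instance (N : Int) (Q : Int) (B : List Int) (C : List Int) : Decidable (Pre_solution N Q B C) := by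
  unfold Pre_solution; infer_instance

def pvWitness_solution : Int × Int × List Int × List Int := (4, 2, [1, 2, 1, 2], [3, 3, 3, 4])

def Spec_solution (N : Int) (Q : Int) (B : List Int) (C : List Int) (out : Int) : Prop := out = solution_alt N Q B C
instance (N : Int) (Q : Int) (B : List Int) (C : List Int) (out : Int) : Decidable (Spec_solution N Q B C out) := by unfold Spec_solution; infer_instance

-- ===== CLAIM (what is proved, stated in full; the proofs are below) =====
def Claim_equal_solution : Prop := ∀ (N : Int) (Q : Int) (B : List Int) (C : List Int), Dom_solution N Q B C → Pre_solution N Q B C → Spec_solution N Q B C (solution N Q B C)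

-- ===== LEMMAS AND PROOFS =====

-- the pair sequence of the first m indices
def kseq (B : List Int) (C : List Int) (m : Nat) : List (Int × Int) :=
  (List.range m).map (pairAt B C)

-- shared spec: first index i in the list with prefix count of its pair equal to Q
def fh (Q : Int) (B : List Int) (C : List Int) : List Nat → Option Nat
  | [] => none
  | i :: rest =>
    if ((kseq B C (i + 1)).count (pairAt B C i) : Int) = Q then some i
    else fh Q B C rest

theorem kseq_succ (B C : List Int) (m : Nat) :
    kseq B C (m + 1) = kseq B C m ++ [pairAt B C m] := by
  simp [kseq, List.range_succ]

theorem loopA_eq (Q : Int) (B C : List Int) :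
    ∀ (m i : Nat) (book : PySem.Dict (Int × Int) Int),
      (∀ p, book.getD p 0 = ((kseq B C i).count p : Int)) →
      solutionLoop Q B C book (List.range' i m)
        = (fh Q B C (List.range' i m)).elim (-1) (fun j => (j : Int)) := by
  intro m
  induction m with
  | zero => intro i book _; simp [solutionLoop, fh]
  | succ m ih =>
    intro i book h
    rw [List.range'_succ]
    have hk : (book.insert (pairAt B C i) (book.getD (pairAt B C i) 0 + 1)).getD
        (pairAt B C i) 0 = ((kseq B C (i + 1)).count (pairAt B C i) : Int) := by
      rw [PySem.Dict.getD_insert_self, h, kseq_succ]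
      push_cast
      simp [List.count_append]
    simp only [solutionLoop, fh]
    rw [hk]
    split
    · simp
    · apply ih
      intro p
      rw [PySem.Dict.getD_insert, kseq_succ]
      split_ifs with hp
      · subst hp; rw [h]; push_cast; simp [List.count_append]
      · have hp' : pairAt B C i ≠ p := fun he => hp he.symm
        rw [h]; push_cast
        simp [List.count_append, List.count_singleton, hp']

theorem getD_foldl_insert_pair (B C : List Int) :
    ∀ (l : List Nat) (d : PySem.Dict (Int × Int) Int) (p : Int × Int),
      (l.foldl (fun d i => d.insert (pairAt B C i) (d.getD (pairAt B C i) 0 + 1)) d).getD p 0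
        = d.getD p 0 + ((l.map (pairAt B C)).count p : Int) := by
  intro l
  induction l with
  | nil => intro d p; simp
  | cons i l ih =>
    intro d p
    rw [List.foldl_cons, ih, PySem.Dict.getD_insert, List.map_cons, List.count_cons]
    by_cases hp : p = pairAt B C i
    · subst hp
      simp only [if_pos rfl, BEq.rfl, if_true]
      push_cast
      ring
    · have hp2 : ¬ pairAt B C i = p := fun he => hp he.symm
      simp [hp, hp2]

theorem getD_totalCnt (B C : List Int) (p : Int × Int) :
    (totalCnt B C).getD p 0 = ((kseq B C B.length).count p : Int) := by
  unfold totalCnt kseq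
  rw [getD_foldl_insert_pair]
  simp

theorem loopB_eq (Q : Int) (B C : List Int) :
    ∀ (m i : Nat) (b : Int) (s : PySem.Dict (Int × Int) Int),
      i + m ≤ B.length →
      (∀ p, s.getD p 0 =
        (((List.range' (i + m) (B.length - (i + m))).map (pairAt B C)).count p : Int)) →
      ((List.range' i m).reverse.foldl (stepB Q B C (totalCnt B C)) (b, s)).1
        = (fh Q B C (List.range' i m)).elim b (fun j => (j : Int)) ∧
      (∀ p, ((List.range' i m).reverse.foldl (stepB Q B C (totalCnt B C)) (b, s)).2.getD p 0 =
        (((List.range' i (B.length - i)).map (pairAt B C)).count p : Int)) := by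
  intro m
  induction m with
  | zero =>
    intro i b s _ hs
    constructor
    · simp [fh]
    · intro p
      have hx : i + 0 = i := by omega
      rw [hx] at hs
      simpa using hs p
  | succ m ih =>
    intro i b s hle hs
    have hle' : (i + 1) + m ≤ B.length := by omega
    have hs' : ∀ p, s.getD p 0 =
        (((List.range' ((i + 1) + m) (B.length - ((i + 1) + m))).map (pairAt B C)).count p : Int) := by
      intro p
      have hx : (i + 1) + m = i + (m + 1) := by omega
      rw [hx]
      exact hs p
    obtain ⟨ih1, ih2⟩ := ih (i + 1) b s hle' hs'
    set r := (List.range' (i + 1) m).reverse.foldl (stepB Q B C (totalCnt B C)) (b, s) with hr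
    have hrev : (List.range' i (m + 1)).reverse
        = (List.range' (i + 1) m).reverse ++ [i] := by
      rw [List.range'_succ]; simp
    have hsplit : List.range' 0 B.length
        = List.range' 0 (i + 1) ++ List.range' (i + 1) (B.length - (i + 1)) := by
      have h2 := @List.range'_append 0 (i + 1) (B.length - (i + 1)) 1
      simp only [one_mul, Nat.zero_add] at h2
      rw [h2]
      congr 1
      omega
    have hcond : ∀ k, (totalCnt B C).getD k 0 - r.2.getD k 0
        = ((kseq B C (i + 1)).count k : Int) := by
      intro k
      rw [getD_totalCnt, ih2 k]
      unfold kseq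
      rw [List.range_eq_range', List.range_eq_range', hsplit]
      simp [List.count_append]
    constructor
    · rw [hrev, List.foldl_append, ← hr]
      rw [List.range'_succ]
      simp only [fh, List.foldl_cons, List.foldl_nil, stepB]
      rw [hcond]
      split
      · simp
      · simpa using ih1
    · intro p
      rw [hrev, List.foldl_append, ← hr]
      simp only [List.foldl_cons, List.foldl_nil, stepB]
      rw [PySem.Dict.getD_insert]
      have hrange : List.range' i (B.length - i)
          = i :: List.range' (i + 1) (B.length - (i + 1)) := by
        have h1 : B.length - i = (B.length - (i + 1)) + 1 := by omega
        rw [h1, List.range'_succ]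
      rw [hrange, List.map_cons, List.count_cons]
      by_cases hp : p = pairAt B C i
      · subst hp
        simp only [BEq.rfl, if_true, if_pos]
        rw [ih2]
        push_cast
        ring
      · have hp2 : ¬ pairAt B C i = p := fun he => hp he.symm
        simp [hp, hp2, ih2 p]

-- ===== VERDICT (by name: the statement is the Claim_ definition above) =====
theorem solution_spec : Claim_equal_solution := by
  intro N Q B C _ _
  unfold Spec_solution solution solution_alt
  have hA := loopA_eq Q B C B.length 0 PySem.Dict.empty
    (by intro p; simp [kseq])
  have hB := (loopB_eq Q B C B.length 0 (-1) PySem.Dict.empty (by omega)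
    (by intro p; simp)).1
  rw [List.range_eq_range', hA, hB]
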